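-- pv_equiv track=rewrite | github.com/rupasritata/python_repo | python_cls/python_17-07/test.py | captoFront
-- ===== SOURCE A (Python) =====
-- def captoFront(s):
--     capitals = ""
--     smalls = ""
--     for i in s:
--         if i.isupper():
--            capitals+=i
--     for i in s:
--         if i.islower():
--             smalls+=i
--     return capitals +smalls
-- ===== SOURCE B (Python) =====
-- def captoFront(s):
--     letters = [c for c in s if c.isupper() or c.islower()]
--     return ''.join(sorted(letters, key=str.islower))
-- ===== Notes on version B (the rewrite author's own statement) =====
-- stated objective: idiomatic
-- what changed: Replaces A's two separate category-scan passes with a single filter of cased characters followed by one stable sort keyed on islower (False/uppercase before True/lowercase).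
import Mathlib
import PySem

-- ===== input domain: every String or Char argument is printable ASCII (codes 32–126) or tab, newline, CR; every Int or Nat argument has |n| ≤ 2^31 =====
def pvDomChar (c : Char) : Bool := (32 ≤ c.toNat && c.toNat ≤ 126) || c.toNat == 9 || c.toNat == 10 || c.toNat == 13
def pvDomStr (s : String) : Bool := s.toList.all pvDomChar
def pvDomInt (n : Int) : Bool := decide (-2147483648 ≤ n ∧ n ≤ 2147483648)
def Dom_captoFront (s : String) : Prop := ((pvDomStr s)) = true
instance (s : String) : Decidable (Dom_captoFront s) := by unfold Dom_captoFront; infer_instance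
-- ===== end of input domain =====

-- B replaces A's two category-scan passes with one filter of the cased characters followed by a
-- stable sort keyed on islower (uppercase first); same return value, more idiomatic.

-- ===== PORT A =====
def captoFront (s : String) : String :=
  let capitals : List Char :=
    s.toList.foldl (fun acc i => if PySem.Chars.isupper i then acc ++ [i] else acc) []
  let smalls : List Char :=
    s.toList.foldl (fun acc i => if PySem.Chars.islower i then acc ++ [i] else acc) []
  String.ofList (capitals ++ smalls)

-- ===== PORT B =====
def captoFront_alt (s : String) : String :=
  let letters : List Char :=
    s.toList.filter (fun c => PySem.Chars.isupper c || PySem.Chars.islower c)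
  String.ofList (PySem.List.sorted letters (fun c => PySem.Chars.islower c) false)

-- ===== PRECONDITION & SPEC =====
def Spec_captoFront (s : String) (out : String) : Prop := out = captoFront_alt s
instance (s : String) (out : String) : Decidable (Spec_captoFront s out) := by unfold Spec_captoFront; infer_instance

-- ===== CLAIM (what is proved, stated in full; the proofs are below) =====
def Claim_equal_captoFront : Prop := ∀ (s : String), Dom_captoFront s → Spec_captoFront s (captoFront s)

-- ===== LEMMAS AND PROOFS =====

theorem upper_not_lower (c : Char) (h : PySem.Chars.isupper c = true) :
    PySem.Chars.islower c = false := by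
  simp only [PySem.Chars.isupper, Bool.and_eq_true, decide_eq_true_eq] at h
  have hlt : c < 'a' := lt_of_le_of_lt h.2 (by decide)
  simp only [PySem.Chars.islower, Bool.and_eq_false_iff]
  left
  simp [not_le.mpr hlt]

theorem insertBy_true_key (x : Char) (hx : PySem.Chars.islower x = true) (l : List Char) :
    PySem.List.insertBy
      (fun a b => decide (PySem.Chars.islower a < PySem.Chars.islower b)) x l = l ++ [x] := by
  induction l with
  | nil => rfl
  | cons y ys ih =>
      have : decide (PySem.Chars.islower x < PySem.Chars.islower y) = false := by
        simp [hx, Bool.lt_iff]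
      simp [PySem.List.insertBy, this, ih]

theorem insertBy_false_key (x : Char) (hx : PySem.Chars.islower x = false) :
    ∀ us vs : List Char, (∀ c ∈ us, PySem.Chars.islower c = false) →
      (∀ c ∈ vs, PySem.Chars.islower c = true) →
      PySem.List.insertBy
        (fun a b => decide (PySem.Chars.islower a < PySem.Chars.islower b)) x (us ++ vs)
        = us ++ x :: vs := by
  intro us
  induction us with
  | nil =>
      intro vs _ hv
      cases vs with
      | nil => rfl
      | cons y ys =>
          have : decide (PySem.Chars.islower x < PySem.Chars.islower y) = true := by
            simp [hx, hv y (by simp), Bool.lt_iff]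
          simp [PySem.List.insertBy, this]
  | cons u us ih =>
      intro vs hu hv
      have hud : decide (PySem.Chars.islower x < PySem.Chars.islower u) = false := by
        simp [hu u (by simp), Bool.lt_iff]
      simp only [List.cons_append, PySem.List.insertBy, hud, Bool.false_eq_true, if_false]
      rw [ih vs (fun c hc => hu c (by simp [hc])) hv]

theorem foldl_insertBy_bool (xs : List Char) :
    ∀ us vs : List Char, (∀ c ∈ us, PySem.Chars.islower c = false) →
      (∀ c ∈ vs, PySem.Chars.islower c = true) →
      xs.foldl (fun acc x =>
          PySem.List.insertBy
            (fun a b => decide (PySem.Chars.islower a < PySem.Chars.islower b)) x acc) (us ++ vs)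
        = (us ++ xs.filter (fun c => !PySem.Chars.islower c)) ++ (vs ++ xs.filter PySem.Chars.islower) := by
  induction xs with
  | nil => intro us vs _ _; simp
  | cons x xs ih =>
      intro us vs hu hv
      rcases Bool.eq_false_or_eq_true (PySem.Chars.islower x) with hx | hx
      · have h1 : PySem.List.insertBy
            (fun a b => decide (PySem.Chars.islower a < PySem.Chars.islower b)) x (us ++ vs)
            = us ++ (vs ++ [x]) := by
          rw [insertBy_true_key x hx]; simp
        have hv' : ∀ c ∈ vs ++ [x], PySem.Chars.islower c = true := by
          intro c hc
          rcases List.mem_append.1 hc with h | h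
          · exact hv c h
          · rw [List.mem_singleton] at h; rw [h]; exact hx
        rw [List.foldl_cons, h1, ih us (vs ++ [x]) hu hv']
        simp [hx]
      · have h1 : PySem.List.insertBy
            (fun a b => decide (PySem.Chars.islower a < PySem.Chars.islower b)) x (us ++ vs)
            = (us ++ [x]) ++ vs := by
          rw [insertBy_false_key x hx us vs hu hv]; simp
        have hu' : ∀ c ∈ us ++ [x], PySem.Chars.islower c = false := by
          intro c hc
          rcases List.mem_append.1 hc with h | h
          · exact hu c h
          · rw [List.mem_singleton] at h; rw [h]; exact hx
        rw [List.foldl_cons, h1, ih (us ++ [x]) vs hu' hv]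
        simp [hx]

theorem sorted_bool_key (l : List Char) :
    PySem.List.sorted l (fun c => PySem.Chars.islower c) false
      = l.filter (fun c => !PySem.Chars.islower c) ++ l.filter PySem.Chars.islower := by
  rw [PySem.List.sorted_eq_foldl_insertBy]
  have := foldl_insertBy_bool l [] [] (by simp) (by simp)
  simpa using this

theorem filter_not_lower (l : List Char) :
    (l.filter (fun c => PySem.Chars.isupper c || PySem.Chars.islower c)).filter
        (fun c => !PySem.Chars.islower c)
      = l.filter PySem.Chars.isupper := by
  induction l with
  | nil => rfl
  | cons c l ih =>
      by_cases hu : PySem.Chars.isupper c = true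
      · simp [hu, upper_not_lower c hu, ih]
      · have hu' : PySem.Chars.isupper c = false := by simpa using hu
        by_cases hl : PySem.Chars.islower c = true
        · simp [hu', hl, ih]
        · have hl' : PySem.Chars.islower c = false := by simpa using hl
          simp [hu', hl', ih]

theorem filter_lower (l : List Char) :
    (l.filter (fun c => PySem.Chars.isupper c || PySem.Chars.islower c)).filter
        PySem.Chars.islower
      = l.filter PySem.Chars.islower := by
  induction l with
  | nil => rfl
  | cons c l ih =>
      by_cases hl : PySem.Chars.islower c = true
      · simp [hl, ih]
      · have hl' : PySem.Chars.islower c = false := by simpa using hl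
        by_cases hu : PySem.Chars.isupper c = true
        · simp [hl', hu, ih]
        · have hu' : PySem.Chars.isupper c = false := by simpa using hu
          simp [hl', hu', ih]

-- ===== VERDICT (by name: the statement is the Claim_ definition above) =====
theorem captoFront_spec : Claim_equal_captoFront := by
  intro s _
  unfold Spec_captoFront captoFront captoFront_alt
  simp only [PySem.List.foldl_append_if (f := fun (c : Char) => c), List.nil_append, List.map_id']
  rw [sorted_bool_key, filter_not_lower, filter_lower]
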